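-- pv_equiv track=rewrite | github.com/paulin1C/sphere_crochet | main.py | interactive
-- ===== SOURCE A (Python) =====
-- def interactive(guide):
--     ins = ""
--     for letter in guide:
--         ins += letter
--         if ins[-1] == "D":
--             yield ins
--             ins = ""
--     if ins != "":
--         yield ins
-- ===== SOURCE B (Python) =====
-- def interactive(guide):
--     *body, tail = guide.split('D')
--     for p in body:
--         yield p + 'D'
--     if tail:
--         yield tail
-- ===== Notes on version B (the rewrite author's own statement) =====
-- stated objective: idiomatic
-- what changed: Replaces the character-by-character accumulation loop with a single str.split('D') followed by re-appending 'D' to each body piece and yielding a non-empty tail.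
import Mathlib
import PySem

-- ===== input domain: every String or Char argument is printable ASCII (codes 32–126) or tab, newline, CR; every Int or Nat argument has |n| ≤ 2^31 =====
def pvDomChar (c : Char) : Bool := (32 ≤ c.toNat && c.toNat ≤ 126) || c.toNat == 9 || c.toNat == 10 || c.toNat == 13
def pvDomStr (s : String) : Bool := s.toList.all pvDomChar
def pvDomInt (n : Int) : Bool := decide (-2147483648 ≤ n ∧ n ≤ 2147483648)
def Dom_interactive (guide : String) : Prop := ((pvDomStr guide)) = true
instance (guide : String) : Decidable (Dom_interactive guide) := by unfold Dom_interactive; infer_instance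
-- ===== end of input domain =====

-- B replaces A's character-accumulation loop with one split('D') pass; objective: idiomatic.
-- A is a generator; equivalence is about the list of yielded values.

-- ===== PORT A =====
-- for letter in guide: ins += letter; if ins[-1] == "D": yield ins; ins = ""   / final: if ins: yield ins
def interactiveLoop (cs : List Char) (ins : List Char) (acc : List String) : List String :=
  match cs with
  | [] => if ins ≠ [] then acc ++ [String.ofList ins] else acc
  | c :: rest =>
    let ins' := ins ++ [c]
    if PySem.List.pyGet? ins' (-1) = some 'D' then
      interactiveLoop rest [] (acc ++ [String.ofList ins'])
    else
      interactiveLoop rest ins' acc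

def interactive (guide : String) : List String :=
  interactiveLoop guide.toList [] []

-- ===== PORT B =====
-- *body, tail = guide.split('D'); yield p + 'D' for p in body; if tail: yield tail
def interactive_alt (guide : String) : List String :=
  let parts := PySem.Chars.splitOn guide.toList ['D']
  let body := parts.dropLast
  let tail := parts.getLastD []
  body.map (fun p => String.ofList (p ++ ['D'])) ++
    (if tail ≠ [] then [String.ofList tail] else [])

-- ===== PRECONDITION & SPEC =====
def Spec_interactive (guide : String) (out : List String) : Prop := out = interactive_alt guide
instance (guide : String) (out : List String) : Decidable (Spec_interactive guide out) := by unfold Spec_interactive; infer_instance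

-- ===== CLAIM (what is proved, stated in full; the proofs are below) =====
def Claim_equal_interactive : Prop := ∀ (guide : String), Dom_interactive guide → Spec_interactive guide (interactive guide)

-- ===== LEMMAS AND PROOFS =====

/-- Structural split on a single 'D': the value `PySem.Chars.splitOn xs ['D']` computes. -/
def splitD : List Char → List (List Char)
  | [] => [[]]
  | c :: rest => if c = 'D' then [] :: splitD rest else (splitD rest).modifyHead (c :: ·)

theorem splitD_ne_nil (xs : List Char) : splitD xs ≠ [] := by
  cases xs with
  | nil => simp [splitD]
  | cons c rest =>
    simp only [splitD]
    split
    · simp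
    · cases h : splitD rest with
      | nil => exact absurd h (splitD_ne_nil rest)
      | cons a l => simp

theorem modifyHead_idfun {α : Type} (l : List α) : l.modifyHead (fun x => x) = l := by
  cases l <;> simp

theorem go_spec (fuel : Nat) (l cur : List Char) (acc : List (List Char))
    (h : l.length < fuel) :
    PySem.Chars.splitOn.go ['D'] fuel l cur acc
      = acc.reverse ++ (splitD l).modifyHead (cur.reverse ++ ·) := by
  induction fuel generalizing l cur acc with
  | zero => omega
  | succ f ih =>
    cases l with
    | nil =>
      simp [PySem.Chars.splitOn.go, splitD]
    | cons c rest =>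
      by_cases hc : c = 'D'
      · subst hc
        have hpre : List.isPrefixOf ['D'] ('D' :: rest) = true := by
          simp [List.isPrefixOf]
        rw [show PySem.Chars.splitOn.go ['D'] (f+1) ('D' :: rest) cur acc
            = PySem.Chars.splitOn.go ['D'] f (List.drop (['D'] : List Char).length ('D' :: rest)) [] (cur.reverse :: acc) by
          simp [PySem.Chars.splitOn.go, hpre]]
        rw [ih _ _ _ (by simp at h ⊢; omega)]
        simp [splitD, modifyHead_idfun]
      · have hpre : List.isPrefixOf ['D'] (c :: rest) = false := by
          simp [List.isPrefixOf]
          exact fun h' => hc h'.symm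
        rw [show PySem.Chars.splitOn.go ['D'] (f+1) (c :: rest) cur acc
            = PySem.Chars.splitOn.go ['D'] f rest (c :: cur) acc by
          simp [PySem.Chars.splitOn.go, hpre]]
        rw [ih _ _ _ (by simp at h ⊢; omega)]
        simp only [splitD, if_neg hc]
        cases hsp : splitD rest with
        | nil => exact absurd hsp (splitD_ne_nil rest)
        | cons a l => simp

theorem splitOn_eq_splitD (xs : List Char) :
    PySem.Chars.splitOn xs ['D'] = splitD xs := by
  have := go_spec (xs.length + 1) xs [] [] (by omega)
  simpa [PySem.Chars.splitOn, modifyHead_idfun] using this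

/-- What B computes from a parts list, at the char-list level. -/
def renderD (parts : List (List Char)) : List String :=
  parts.dropLast.map (fun p => String.ofList (p ++ ['D'])) ++
    (if parts.getLastD [] ≠ [] then [String.ofList (parts.getLastD [])] else [])

theorem renderD_cons (p : List Char) (parts : List (List Char)) (h : parts ≠ []) :
    renderD (p :: parts) = String.ofList (p ++ ['D']) :: renderD parts := by
  unfold renderD
  cases parts with
  | nil => exact absurd rfl h
  | cons a l => simp

theorem interactiveLoop_eq (cs ins : List Char) (acc : List String) :
    interactiveLoop cs ins acc = acc ++ renderD ((splitD cs).modifyHead (ins ++ ·)) := by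
  induction cs generalizing ins acc with
  | nil =>
    by_cases h : ins = [] <;> simp [interactiveLoop, splitD, renderD, h]
  | cons c rest ih =>
    by_cases hc : c = 'D'
    · subst hc
      rw [show interactiveLoop ('D' :: rest) ins acc
          = interactiveLoop rest [] (acc ++ [String.ofList (ins ++ ['D'])]) by
        simp [interactiveLoop]]
      rw [ih]
      rw [show splitD ('D' :: rest) = [] :: splitD rest from by simp [splitD]]
      rw [List.modifyHead_cons]
      rw [renderD_cons (ins ++ []) _ (splitD_ne_nil rest)]
      simp [modifyHead_idfun]
    · rw [show interactiveLoop (c :: rest) ins acc = interactiveLoop rest (ins ++ [c]) acc by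
        simp [interactiveLoop, hc]]
      rw [ih]
      rw [show splitD (c :: rest) = (splitD rest).modifyHead (c :: ·) from by
        simp [splitD, hc]]
      cases hsp : splitD rest with
      | nil => exact absurd hsp (splitD_ne_nil rest)
      | cons a l => simp

-- ===== VERDICT (by name: the statement is the Claim_ definition above) =====
theorem interactive_spec : Claim_equal_interactive := by
  intro guide _
  unfold Spec_interactive interactive interactive_alt
  rw [interactiveLoop_eq, splitOn_eq_splitD]
  cases hsp : splitD guide.toList with
  | nil => exact absurd hsp (splitD_ne_nil guide.toList)
  | cons a l => simp [renderD]
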